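-- pv_equiv track=rewrite | github.com/michelleduong03/TIP-Course | TIP-102/Dictionaries/session4.py | navigate_research_station
-- ===== SOURCE A (Python) =====
-- def navigate_research_station(station_layout, observations):
--     index_map = {char: i for i, char in enumerate(station_layout)}
--
--     total_time = 0
--     current_pos = 0
--
--     for obs in observations:
--         next_pos = index_map[obs]
--         total_time += abs(current_pos - next_pos)
--         current_pos = next_pos
--
--     return total_time
-- ===== SOURCE B (Python) =====
-- def navigate_research_station(station_layout, observations):
--     index_map = {char: i for i, char in enumerate(station_layout)}
--     path = [0] + [index_map[obs] for obs in observations]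
--     # difference-array sweep: count, for every unit corridor segment [k, k+1),
--     # how many legs of the path traverse it, then sum the counts
--     delta = [0] * (max(path) + 1)
--     for a, b in zip(path, path[1:]):
--         lo, hi = (a, b) if a <= b else (b, a)
--         delta[lo] += 1
--         delta[hi] -= 1
--     total = 0
--     coverage = 0
--     for d in delta:
--         coverage += d
--         total += coverage
--     return total
-- ===== Notes on version B (the rewrite author's own statement) =====
-- stated objective: alternative
-- what changed: B replaces A's running-position accumulation of |cur-next| by a difference-array sweep: each leg of the path marks +1/-1 at its endpoints in a delta array over the corridor, and the answer is the prefix-sum sweep counting how often every unit segment is traversed.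
import Mathlib
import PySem

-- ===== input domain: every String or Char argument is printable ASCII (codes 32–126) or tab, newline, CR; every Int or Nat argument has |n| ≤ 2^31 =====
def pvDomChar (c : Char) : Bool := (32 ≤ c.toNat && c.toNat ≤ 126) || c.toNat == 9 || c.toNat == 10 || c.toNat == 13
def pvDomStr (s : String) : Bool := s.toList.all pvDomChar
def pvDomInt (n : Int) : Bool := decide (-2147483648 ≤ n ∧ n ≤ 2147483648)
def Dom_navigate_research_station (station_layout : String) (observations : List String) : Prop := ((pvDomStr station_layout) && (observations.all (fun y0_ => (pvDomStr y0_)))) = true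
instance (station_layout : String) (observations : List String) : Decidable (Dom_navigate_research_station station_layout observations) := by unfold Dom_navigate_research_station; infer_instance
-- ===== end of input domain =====

-- B replaces A's running-position loop by a difference-array sweep over the corridor
-- (mark each leg's endpoints with +1/-1, then prefix-sum); return values only.

-- ===== PORT A =====
-- index_map = {char: i for i, char in enumerate(station_layout)}  (keys are 1-char strings)
def pvIndexMap (station_layout : String) : PySem.Dict String Int :=
  (PySem.List.enumerate station_layout.toList 0).foldl
    (fun d p => d.insert (String.ofList [p.2]) p.1) (PySem.Dict.mk [])

-- the loop state is (total_time, current_pos); index_map[obs] is exact under Pre_ (get? = some)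
def navigate_research_station (station_layout : String) (observations : List String) : Int :=
  let index_map := pvIndexMap station_layout
  (observations.foldl
    (fun (st : Int × Int) obs =>
      let next_pos := (index_map.get? obs).getD 0
      (st.1 + |st.2 - next_pos|, next_pos))
    (0, 0)).1

-- ===== PORT B =====
-- delta[i] += c with an Int index, exact where Python succeeds (in range after wraparound);
-- B's indices are always in range (proved below), so the else branch is unreachable here
def pvAddAt (l : List Int) (i : Int) (c : Int) : List Int :=
  let j := if i < 0 then i + l.length else i
  l.set j.toNat (l.getD j.toNat 0 + c)

def navigate_research_station_alt (station_layout : String) (observations : List String) : Int :=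
  let index_map := pvIndexMap station_layout
  let path : List Int := 0 :: observations.map (fun obs => (index_map.get? obs).getD 0)
  let delta0 : List Int := List.replicate (((PySem.List.max? path (fun x => x)).getD 0) + 1).toNat 0
  let delta := (path.zip path.tail).foldl
    (fun dl p =>
      let lo := if p.1 ≤ p.2 then p.1 else p.2
      let hi := if p.1 ≤ p.2 then p.2 else p.1
      pvAddAt (pvAddAt dl lo 1) hi (-1)) delta0
  (delta.foldl (fun (st : Int × Int) d => (st.1 + (st.2 + d), st.2 + d)) (0, 0)).1

-- ===== PRECONDITION & SPEC =====
-- Pre_ excludes exactly the inputs on which both Pythons raise (KeyError): an observation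
-- that is not a single character occurring in station_layout.
def Pre_navigate_research_station (station_layout : String) (observations : List String) : Prop :=
  ∀ o ∈ observations, o ∈ station_layout.toList.map (fun c => String.ofList [c])
instance (station_layout : String) (observations : List String) : Decidable (Pre_navigate_research_station station_layout observations) := by unfold Pre_navigate_research_station; infer_instance

def pvWitness_navigate_research_station : String × List String := ("abc", ["a", "c", "b", "a"])

def Spec_navigate_research_station (station_layout : String) (observations : List String) (out : Int) : Prop := out = navigate_research_station_alt station_layout observations
instance (station_layout : String) (observations : List String) (out : Int) : Decidable (Spec_navigate_research_station station_layout observations out) := by unfold Spec_navigate_research_station; infer_instance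

-- ===== CLAIM =====
def Claim_equal_navigate_research_station : Prop := ∀ (station_layout : String) (observations : List String), Dom_navigate_research_station station_layout observations → Pre_navigate_research_station station_layout observations → Spec_navigate_research_station station_layout observations (navigate_research_station station_layout observations)

-- ===== LEMMAS AND PROOFS =====

theorem foldl_abs_shift (l : List (Int × Int)) (a : Int) :
    l.foldl (fun acc p => acc + |p.1 - p.2|) a = a + l.foldl (fun acc p => acc + |p.1 - p.2|) 0 := by
  induction l generalizing a with
  | nil => simp
  | cons x xs ih =>
    simp only [List.foldl_cons]
    rw [ih (a + |x.1 - x.2|), ih (0 + |x.1 - x.2|)]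
    ring

-- A's stateful loop equals the sum of |a-b| over consecutive pairs of (cur :: map f l)
theorem loop_eq_zip {α : Type} (f : α → Int) (l : List α) (t cur : Int) :
    (l.foldl (fun (st : Int × Int) o => (st.1 + |st.2 - f o|, f o)) (t, cur)).1
      = t + ((cur :: l.map f).zip (l.map f)).foldl (fun acc p => acc + |p.1 - p.2|) 0 := by
  induction l generalizing t cur with
  | nil => simp
  | cons o rest ih =>
    simp only [List.foldl_cons, List.map_cons, List.zip_cons_cons]
    rw [ih, foldl_abs_shift _ (0 + |cur - f o|)]
    ring

-- the sweep (prefix-sum totalling) loop, abstracted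
def pvSweep (l : List Int) : Int :=
  (l.foldl (fun (st : Int × Int) d => (st.1 + (st.2 + d), st.2 + d)) (0, 0)).1

theorem pvSweep_shift (l : List Int) (t cov : Int) :
    (l.foldl (fun (st : Int × Int) d => (st.1 + (st.2 + d), st.2 + d)) (t, cov)).1
      = t + (l.length : Int) * cov + pvSweep l := by
  induction l generalizing t cov with
  | nil => simp [pvSweep]
  | cons d r ih =>
    simp only [List.foldl_cons, pvSweep, List.length_cons]
    rw [ih, ih (0 + (0 + d)) (0 + d)]
    push_cast; ring

theorem pvSweep_cons (d : Int) (r : List Int) :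
    pvSweep (d :: r) = ((r.length : Int) + 1) * d + pvSweep r := by
  have h : pvSweep (d :: r) = (r.foldl (fun (st : Int × Int) d => (st.1 + (st.2 + d), st.2 + d)) (0 + (0 + d), 0 + d)).1 := rfl
  rw [h, pvSweep_shift]
  simp only [pvSweep]; ring

theorem pvSweep_replicate (n : Nat) : pvSweep (List.replicate n 0) = 0 := by
  induction n with
  | zero => simp [pvSweep]
  | succ k ih => rw [List.replicate_succ, pvSweep_cons, ih]; ring

-- bumping slot n by c changes the sweep by c * (len - n)
theorem pvSweep_set (l : List Int) (n : Nat) (c : Int) (h : n < l.length) :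
    pvSweep (l.set n (l.getD n 0 + c)) = pvSweep l + c * ((l.length : Int) - n) := by
  induction l generalizing n with
  | nil => simp at h
  | cons x r ih =>
    cases n with
    | zero => simp only [List.set_cons_zero, List.getD_cons_zero, pvSweep_cons, List.length_cons]; push_cast; ring
    | succ k =>
      simp only [List.set_cons_succ, List.getD_cons_succ, pvSweep_cons, List.length_cons]
      rw [List.length_set, ih k (by simpa using h)]
      push_cast; ring

theorem length_pvAddAt (l : List Int) (i c : Int) : (pvAddAt l i c).length = l.length := by
  simp [pvAddAt]

theorem pvSweep_addAt (l : List Int) (i c : Int) (h0 : 0 ≤ i) (h1 : i < (l.length : Int)) :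
    pvSweep (pvAddAt l i c) = pvSweep l + c * ((l.length : Int) - i) := by
  have hni : ¬ i < 0 := by omega
  have hlt : i.toNat < l.length := by omega
  simp only [pvAddAt, if_neg hni]
  rw [pvSweep_set l i.toNat c hlt]
  congr 1
  have : ((i.toNat : Int)) = i := by omega
  rw [this]

-- main invariant: folding the +1/-1 marks for a list of in-range legs adds the sum of leg lengths
theorem sweep_delta (L : List (Int × Int)) (dl : List Int)
    (hb : ∀ p ∈ L, 0 ≤ p.1 ∧ p.1 < (dl.length : Int) ∧ 0 ≤ p.2 ∧ p.2 < (dl.length : Int)) :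
    pvSweep (L.foldl
      (fun dl p =>
        pvAddAt (pvAddAt dl (if p.1 ≤ p.2 then p.1 else p.2) 1)
          (if p.1 ≤ p.2 then p.2 else p.1) (-1)) dl)
      = pvSweep dl + L.foldl (fun acc p => acc + |p.1 - p.2|) 0 := by
  induction L generalizing dl with
  | nil => simp
  | cons p r ih =>
    obtain ⟨h1, h2, h3, h4⟩ := hb p (List.mem_cons_self ..)
    simp only [List.foldl_cons]
    set lo := if p.1 ≤ p.2 then p.1 else p.2 with hlo
    set hi := if p.1 ≤ p.2 then p.2 else p.1 with hhi
    have hlo0 : 0 ≤ lo := by rw [hlo]; split <;> omega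
    have hlolt : lo < (dl.length : Int) := by rw [hlo]; split <;> omega
    have hhi0 : 0 ≤ hi := by rw [hhi]; split <;> omega
    have hhilt : hi < (dl.length : Int) := by rw [hhi]; split <;> omega
    have hlen1 : (pvAddAt dl lo 1).length = dl.length := length_pvAddAt ..
    have hlen2 : (pvAddAt (pvAddAt dl lo 1) hi (-1)).length = dl.length := by
      rw [length_pvAddAt, hlen1]
    rw [ih _ (by intro q hq; have := hb q (List.mem_cons_of_mem _ hq); rw [hlen2]; exact this)]
    rw [pvSweep_addAt _ _ _ hhi0 (by rw [hlen1]; exact hhilt),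
        pvSweep_addAt _ _ _ hlo0 hlolt]
    have habs : |p.1 - p.2| = hi - lo := by
      rw [hlo, hhi]; rcases le_or_gt p.1 p.2 with h | h
      · rw [if_pos h, if_pos h, abs_of_nonpos (by omega)]; ring
      · rw [if_neg (by omega), if_neg (by omega), abs_of_pos (by omega)]
    rw [hlen1, habs, foldl_abs_shift r (0 + (hi - lo))]
    ring

-- every value stored in pvIndexMap is a nonnegative index
theorem indexMap_items_nonneg (station_layout : String) :
    ∀ p ∈ (pvIndexMap station_layout).items, 0 ≤ p.2 := by
  have key : ∀ (l : List (Int × Char)) (d : PySem.Dict String Int),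
      (∀ p ∈ d.items, 0 ≤ p.2) → (∀ q ∈ l, 0 ≤ q.1) →
      ∀ p ∈ (l.foldl (fun d p => d.insert (String.ofList [p.2]) p.1) d).items, 0 ≤ p.2 := by
    intro l
    induction l with
    | nil => intro d hd _ p hp; exact hd p hp
    | cons q r ih =>
      intro d hd hl p hp
      refine ih _ ?_ (fun x hx => hl x (List.mem_cons_of_mem _ hx)) p hp
      intro x hx
      rcases (PySem.Dict.mem_items_insert _ _ _ _).1 hx with h | h
      · subst h; exact hl q (List.mem_cons_self ..)
      · exact hd x h.1
  intro p hp
  refine key _ _ (by simp) ?_ p hp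
  intro q hq
  rcases (PySem.List.mem_enumerate_iff _ _ _).1 hq with ⟨k, hk, rfl⟩
  simp

theorem indexMap_getD_nonneg (station_layout : String) (o : String) :
    0 ≤ ((pvIndexMap station_layout).get? o).getD 0 := by
  cases h : (pvIndexMap station_layout).get? o with
  | none => simp
  | some v =>
    simp only [Option.getD_some]
    exact indexMap_items_nonneg station_layout _ (PySem.Dict.mem_items_of_get?_eq_some _ h)

-- ===== VERDICT =====
theorem navigate_research_station_spec : Claim_equal_navigate_research_station := by
  intro sl obs _ _
  show _ = _
  simp only [navigate_research_station, navigate_research_station_alt]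
  rw [loop_eq_zip (fun o => ((pvIndexMap sl).get? o).getD 0)]
  set f : String → Int := fun o => ((pvIndexMap sl).get? o).getD 0 with hf
  set path : List Int := 0 :: obs.map f with hpath
  -- path is nonempty, its elements are nonnegative and ≤ its max m
  cases hm : PySem.List.max? path (fun x => x) with
  | none => exact absurd ((PySem.List.max?_eq_none_iff _ _).1 hm) (by simp [hpath])
  | some m =>
    have hmem : ∀ x ∈ path, 0 ≤ x ∧ x ≤ m := by
      intro x hx
      refine ⟨?_, PySem.List.max?_isMax hm x hx⟩
      rw [hpath] at hx
      simp only [List.mem_cons] at hx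
      rcases hx with rfl | hx
      · omega
      · rcases List.mem_map.1 hx with ⟨o, -, rfl⟩
        exact indexMap_getD_nonneg sl o
    have hm0 : 0 ≤ m := (hmem 0 (by simp [hpath])).2
    have hlen : ((List.replicate ((m + 1)).toNat (0 : Int)).length : Int) = m + 1 := by
      simp; omega
    simp only [Option.getD_some]
    have hsw : ∀ (l : List Int), (l.foldl (fun (st : Int × Int) d => (st.1 + (st.2 + d), st.2 + d)) (0, 0)).1 = pvSweep l := fun _ => rfl
    rw [hsw]
    rw [sweep_delta _ _ ?bounds]
    case bounds =>
      intro p hp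
      have h1 := hmem p.1 (List.of_mem_zip hp).1
      have h2 := hmem p.2 (by
        have := (List.of_mem_zip hp).2
        exact List.mem_cons_of_mem _ (by simpa [hpath] using this))
      rw [hlen]; omega
    rw [pvSweep_replicate]
    simp only [hpath, List.tail_cons]
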